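-- pv_equiv track=rewrite | github.com/Kokecoco/othello2 | mcts.py | evaluate_board3
-- ===== SOURCE A (Python) =====
-- def evaluate_board3(board, stone):
--     opponent_stone = 'B' if stone == 'W' else 'W'
--     stone_count = sum(row.count(stone) for row in board)
--     opponent_stone_count = sum(row.count(opponent_stone) for row in board)
--     score = stone_count - opponent_stone_count
--
--     positional_value = [
--         [100, -10, 10, 10, 10, 10, -10, 100],
--         [-10, -20, 1, 1, 1, 1, -20, -10],
--         [10, 1, 5, 5, 5, 5, 1, 10],
--         [10, 1, 5, 5, 5, 5, 1, 10],
--         [10, 1, 5, 5, 5, 5, 1, 10],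
--         [10, 1, 5, 5, 5, 5, 1, 10],
--         [-10, -20, 1, 1, 1, 1, -20, -10],
--         [100, -10, 10, 10, 10, 10, -10, 100]
--     ]
--
--     positional_score = sum(
--         positional_value[row][col] if cell == stone else -
--         positional_value[row][col]
--         for row, board_row in enumerate(board)
--         for col, cell in enumerate(board_row) if cell in [stone, opponent_stone]
--     )
--
--     return score + positional_score
-- ===== SOURCE B (Python) =====
-- def evaluate_board3(board, stone):
--     opponent_stone = 'B' if stone == 'W' else 'W'
--     positional_value = [
--         [100, -10, 10, 10, 10, 10, -10, 100],
--         [-10, -20, 1, 1, 1, 1, -20, -10],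
--         [10, 1, 5, 5, 5, 5, 1, 10],
--         [10, 1, 5, 5, 5, 5, 1, 10],
--         [10, 1, 5, 5, 5, 5, 1, 10],
--         [10, 1, 5, 5, 5, 5, 1, 10],
--         [-10, -20, 1, 1, 1, 1, -20, -10],
--         [100, -10, 10, 10, 10, 10, -10, 100]
--     ]
--     total = 0
--     for row, board_row in enumerate(board):
--         for col, cell in enumerate(board_row):
--             if cell == stone:
--                 total += 1 + positional_value[row][col]
--             elif cell == opponent_stone:
--                 total -= 1 + positional_value[row][col]
--     return total
-- ===== Notes on version B (the rewrite author's own statement) =====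
-- stated objective: simpler
-- what changed: Replaced the three separate board scans (count of own stones, count of opponent stones, and the positional comprehension) with one single pass over the cells that maintains a single accumulator, adding 1+weight for own stones and subtracting 1+weight for opponent stones.
import Mathlib
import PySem

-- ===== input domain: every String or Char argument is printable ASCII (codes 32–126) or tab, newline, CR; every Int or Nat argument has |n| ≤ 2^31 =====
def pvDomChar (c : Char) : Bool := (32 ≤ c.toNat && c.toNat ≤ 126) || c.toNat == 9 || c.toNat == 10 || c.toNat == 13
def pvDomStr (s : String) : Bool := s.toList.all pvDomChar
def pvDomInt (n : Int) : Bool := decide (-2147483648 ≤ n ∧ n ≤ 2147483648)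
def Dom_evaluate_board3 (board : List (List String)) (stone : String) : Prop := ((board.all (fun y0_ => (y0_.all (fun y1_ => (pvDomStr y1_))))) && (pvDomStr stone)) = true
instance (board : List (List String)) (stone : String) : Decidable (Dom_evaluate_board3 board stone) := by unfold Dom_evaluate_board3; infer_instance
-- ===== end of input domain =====

-- B fuses A's three separate board scans into one single pass with one accumulator (objective: simpler).

-- ===== PORT A =====
-- the positional_value table (identical in both Pythons)
def pvPos : List (List Int) :=
  [[100, -10, 10, 10, 10, 10, -10, 100],
   [-10, -20, 1, 1, 1, 1, -20, -10],
   [10, 1, 5, 5, 5, 5, 1, 10],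
   [10, 1, 5, 5, 5, 5, 1, 10],
   [10, 1, 5, 5, 5, 5, 1, 10],
   [10, 1, 5, 5, 5, 5, 1, 10],
   [-10, -20, 1, 1, 1, 1, -20, -10],
   [100, -10, 10, 10, 10, 10, -10, 100]]

-- positional_value[row][col]; Python raises IndexError out of range (excluded by Pre_), default 0 there
def pvPosAt (r c : Int) : Int := PySem.List.pyGetD (PySem.List.pyGetD pvPos r []) c 0

def evaluate_board3 (board : List (List String)) (stone : String) : Int :=
  let opponent_stone := if stone == "W" then "B" else "W"
  let stone_count : Int := (board.map (fun row => (PySem.List.count row stone : Int))).sum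
  let opponent_stone_count : Int := (board.map (fun row => (PySem.List.count row opponent_stone : Int))).sum
  let score := stone_count - opponent_stone_count
  let positional_score : Int :=
    ((PySem.List.enumerate board 0).flatMap (fun p =>
      (((PySem.List.enumerate p.2 0).filter
          (fun q => q.2 == stone || q.2 == opponent_stone)).map
        (fun q => if q.2 == stone then pvPosAt p.1 q.1 else - pvPosAt p.1 q.1)))).sum
  score + positional_score

-- ===== PORT B =====
def evaluate_board3_alt (board : List (List String)) (stone : String) : Int :=
  let opponent_stone := if stone == "W" then "B" else "W"
  (PySem.List.enumerate board 0).foldl (fun total p =>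
    (PySem.List.enumerate p.2 0).foldl (fun t q =>
      if q.2 == stone then t + (1 + pvPosAt p.1 q.1)
      else if q.2 == opponent_stone then t - (1 + pvPosAt p.1 q.1)
      else t) total) 0

-- ===== PRECONDITION & SPEC =====
-- Pre_ excludes exactly the inputs on which Python A raises IndexError: a cell equal to the
-- player's or the opponent's stone at row index ≥ 8 or column index ≥ 8 (outside the 8×8 table).
def Pre_evaluate_board3 (board : List (List String)) (stone : String) : Prop :=
  let opponent_stone := if stone == "W" then "B" else "W"
  ∀ i, (h : i < board.length) → ∀ j, (h2 : j < board[i].length) →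
    (board[i][j] = stone ∨ board[i][j] = opponent_stone) → i < 8 ∧ j < 8
instance (board : List (List String)) (stone : String) : Decidable (Pre_evaluate_board3 board stone) := by unfold Pre_evaluate_board3; infer_instance

def pvWitness_evaluate_board3 : List (List String) × String :=
  ([["B", "W", "."], [".", "B", "B"]], "B")

def Spec_evaluate_board3 (board : List (List String)) (stone : String) (out : Int) : Prop := out = evaluate_board3_alt board stone
instance (board : List (List String)) (stone : String) (out : Int) : Decidable (Spec_evaluate_board3 board stone out) := by unfold Spec_evaluate_board3; infer_instance

-- ===== CLAIM (what is proved, stated in full; the proofs are below) =====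
def Claim_equal_evaluate_board3 : Prop := ∀ (board : List (List String)) (stone : String), Dom_evaluate_board3 board stone → Pre_evaluate_board3 board stone → Spec_evaluate_board3 board stone (evaluate_board3 board stone)

-- ===== LEMMAS AND PROOFS =====

-- sum over a filtered map equals sum of the if-else pointwise contribution
theorem pv_sum_filter_map {α : Type} (l : List α) (p : α → Bool) (f : α → Int) :
    ((l.filter p).map f).sum = (l.map (fun x => if p x then f x else 0)).sum := by
  induction l with
  | nil => simp
  | cons x t ih =>
    by_cases h : p x <;> simp [h, ih]

-- per-row: B's inner fold equals acc + (#stone - #opponent) + A's positional row sum, given s ≠ o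
theorem pv_row (r : Int) (s o : String) (hso : s ≠ o) :
    ∀ (row : List String) (k acc : Int),
    (PySem.List.enumerate row k).foldl (fun t q =>
      if q.2 == s then t + (1 + pvPosAt r q.1)
      else if q.2 == o then t - (1 + pvPosAt r q.1)
      else t) acc
    = acc + ((row.count s : Int) - (row.count o : Int))
        + ((PySem.List.enumerate row k).map
            (fun q => if (q.2 == s || q.2 == o) then
                        (if q.2 == s then pvPosAt r q.1 else - pvPosAt r q.1) else 0)).sum := by
  intro row
  induction row with
  | nil => intro k acc; simp [PySem.List.enumerate_nil]
  | cons c t ih =>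
    intro k acc
    rw [PySem.List.enumerate_cons]
    simp only [List.foldl_cons, List.map_cons, List.sum_cons]
    by_cases hcs : c = s
    · subst hcs
      have hco : (c == o) = false := by simp [hso]
      simp only [beq_self_eq_true, if_true, Bool.true_or, hco]
      rw [ih (k + 1) (acc + (1 + pvPosAt r k))]
      simp only [List.count_cons, beq_self_eq_true, if_true, hco, Bool.false_eq_true, if_false]
      push_cast
      ring
    · by_cases hco : c = o
      · subst hco
        have h1 : (c == s) = false := by simp; exact fun h => hcs h
        have h1' : (s == c) = false := by simp; exact fun h => hcs h.symm
        simp only [h1, beq_self_eq_true, Bool.false_eq_true, if_false, if_true, Bool.false_or]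
        rw [ih (k + 1) (acc - (1 + pvPosAt r k))]
        simp only [List.count_cons, beq_self_eq_true, if_true, h1, h1', Bool.false_eq_true, if_false]
        push_cast
        ring
      · have h1 : (c == s) = false := by simp [hcs]
        have h2 : (c == o) = false := by simp [hco]
        have h1' : (s == c) = false := by simp; exact fun h => hcs h.symm
        have h2' : (o == c) = false := by simp; exact fun h => hco h.symm
        simp only [h1, h2, Bool.false_eq_true, if_false, Bool.false_or]
        rw [ih (k + 1) acc]
        simp only [List.count_cons, h1, h2, h1', h2', Bool.false_eq_true, if_false]
        push_cast
        ring

theorem pv_stone_ne_opp (stone : String) :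
    stone ≠ (if stone == "W" then "B" else "W") := by
  by_cases h : stone = "W" <;> simp [h]

-- outer: B's nested fold equals acc + score + A's flatMap positional sum
theorem pv_outer (s o : String) (hso : s ≠ o) :
    ∀ (bd : List (List String)) (k : Int) (acc : Int),
    (PySem.List.enumerate bd k).foldl (fun total p =>
      (PySem.List.enumerate p.2 0).foldl (fun t q =>
        if q.2 == s then t + (1 + pvPosAt p.1 q.1)
        else if q.2 == o then t - (1 + pvPosAt p.1 q.1)
        else t) total) acc
    = acc + ((bd.map (fun row => (row.count s : Int))).sum
             - (bd.map (fun row => (row.count o : Int))).sum)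
        + ((PySem.List.enumerate bd k).flatMap (fun p =>
            (((PySem.List.enumerate p.2 0).filter
                (fun q => q.2 == s || q.2 == o)).map
              (fun q => if q.2 == s then pvPosAt p.1 q.1 else - pvPosAt p.1 q.1)))).sum := by
  intro bd
  induction bd with
  | nil => intro k acc; simp [PySem.List.enumerate_nil]
  | cons row t ih =>
    intro k acc
    rw [PySem.List.enumerate_cons]
    simp only [List.foldl_cons, List.flatMap_cons, List.sum_append, List.map_cons, List.sum_cons]
    rw [pv_row k s o hso row 0 acc, ih (k + 1)]
    rw [pv_sum_filter_map]
    ring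

theorem pv_main (board : List (List String)) (stone : String) :
    evaluate_board3 board stone = evaluate_board3_alt board stone := by
  unfold evaluate_board3 evaluate_board3_alt
  have hso := pv_stone_ne_opp stone
  rw [pv_outer stone _ hso board 0 0]
  simp only [PySem.List.count_eq]
  ring

-- ===== VERDICT (by name: the statement is the Claim_ definition above) =====
theorem evaluate_board3_spec : Claim_equal_evaluate_board3 := by
  intro board stone _ _
  unfold Spec_evaluate_board3
  exact pv_main board stone
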